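-- pv_equiv track=rewrite | github.com/splch/qcostas | qcostas.py | is_costas
-- ===== SOURCE A (Python) =====
-- def is_costas(p: list[int]) -> bool:
--     seen = set()
--     for i in range(len(p)):
--         for j in range(i + 1, len(p)):
--             t = (j - i, p[j] - p[i])
--             if t in seen:
--                 return False
--             seen.add(t)
--     return True
-- ===== SOURCE B (Python) =====
-- def is_costas(p: list[int]) -> bool:
--     n = len(p)
--     for d in range(1, n):
--         diffs = sorted(p[i + d] - p[i] for i in range(n - d))
--         if any(a == b for a, b in zip(diffs, diffs[1:])):
--             return False
--     return True
-- ===== Notes on version B (the rewrite author's own statement) =====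
-- stated objective: alternative
-- what changed: Replaces A's incremental membership set of (distance, difference) tuples with sort-then-scan: for each displacement distance the list of value differences is sorted and duplicates are detected by comparing adjacent entries, returning False as soon as one distance fails.
import Mathlib
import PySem

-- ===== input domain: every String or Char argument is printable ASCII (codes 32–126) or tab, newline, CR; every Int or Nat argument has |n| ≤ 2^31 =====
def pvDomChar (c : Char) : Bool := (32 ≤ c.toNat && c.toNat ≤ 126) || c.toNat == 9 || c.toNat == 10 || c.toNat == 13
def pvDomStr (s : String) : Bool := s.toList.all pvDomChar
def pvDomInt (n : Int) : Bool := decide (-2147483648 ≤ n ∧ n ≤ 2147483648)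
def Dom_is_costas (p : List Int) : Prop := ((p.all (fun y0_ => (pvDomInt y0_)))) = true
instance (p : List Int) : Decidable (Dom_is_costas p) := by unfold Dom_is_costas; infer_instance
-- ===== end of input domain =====

-- B detects duplicate displacement vectors by sort-then-scan (per displacement distance,
-- sort the value differences and compare adjacent entries) instead of A's membership set.

-- ===== PORT A =====
-- inner 'for j' loop: none = the early 'return False' on a repeated tuple, else the grown set
def aInner (p : List Int) (i : Int) : List Int → PySem.Set (Int × Int) → Option (PySem.Set (Int × Int))
  | [], seen => some seen
  | j :: js, seen =>
    let t : Int × Int := (j - i, PySem.List.pyGetD p j 0 - PySem.List.pyGetD p i 0)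
    if PySem.Set.contains seen t then none
    else aInner p i js (PySem.Set.add seen t)

-- outer 'for i' loop, threading 'seen'
def aOuter (p : List Int) : List Int → PySem.Set (Int × Int) → Bool
  | [], _ => true
  | i :: is, seen =>
    match aInner p i (PySem.List.pyRange (i + 1) (p.length : Int) 1) seen with
    | none => false
    | some s => aOuter p is s

def is_costas (p : List Int) : Bool :=
  aOuter p (PySem.List.pyRange 0 (p.length : Int) 1) PySem.Set.empty

-- ===== PORT B =====
-- the generator expression '(p[i + d] - p[i] for i in range(n - d))'
def bDiffs (p : List Int) (d : Int) : List Int :=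
  (PySem.List.pyRange 0 ((p.length : Int) - d) 1).map
    (fun i => PySem.List.pyGetD p (i + d) 0 - PySem.List.pyGetD p i 0)

-- 'diffs = sorted(...)' then 'any(a == b for a, b in zip(diffs, diffs[1:]))'
def bCheck (p : List Int) (d : Int) : Bool :=
  let diffs := PySem.List.sorted (bDiffs p d) (fun x => x)
  (diffs.zip diffs.tail).any (fun q => q.1 == q.2)

-- outer 'for d' loop with the early 'return False'
def bOuter (p : List Int) : List Int → Bool
  | [] => true
  | d :: ds => if bCheck p d then false else bOuter p ds

def is_costas_alt (p : List Int) : Bool :=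
  bOuter p (PySem.List.pyRange 1 (p.length : Int) 1)

-- ===== PRECONDITION & SPEC =====
def Spec_is_costas (p : List Int) (out : Bool) : Prop := out = is_costas_alt p
instance (p : List Int) (out : Bool) : Decidable (Spec_is_costas p out) := by unfold Spec_is_costas; infer_instance

-- ===== CLAIM (what is proved, stated in full; the proofs are below) =====
def Claim_equal_is_costas : Prop := ∀ (p : List Int), Dom_is_costas p → Spec_is_costas p (is_costas p)

-- ===== LEMMAS AND PROOFS =====

-- A's tuple key for the index pair (i, j)
def keyK (p : List Int) (q : Int × Int) : Int × Int :=
  (q.2 - q.1, PySem.List.pyGetD p q.2 0 - PySem.List.pyGetD p q.1 0)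

-- B's scalar difference for distance d at index i
def dkey (p : List Int) (d i : Int) : Int :=
  PySem.List.pyGetD p (i + d) 0 - PySem.List.pyGetD p i 0

-- the index pairs (i, j), i < j, in A's traversal order and in B's traversal order
def listA (p : List Int) : List (Int × Int) :=
  (PySem.List.pyRange 0 (p.length : Int) 1).flatMap
    (fun i => (PySem.List.pyRange (i + 1) (p.length : Int) 1).map (fun j => (i, j)))

def listB (p : List Int) : List (Int × Int) :=
  (PySem.List.pyRange 1 (p.length : Int) 1).flatMap
    (fun d => (PySem.List.pyRange 0 ((p.length : Int) - d) 1).map (fun i => (i, i + d)))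

-- the duplicate-detecting inner scan succeeds iff the accumulated list stays Nodup
lemma aInner_eq (p : List Int) (i : Int) :
    ∀ (js : List Int) (seen : PySem.Set (Int × Int)), seen.Nodup →
      aInner p i js seen =
        if (seen ++ js.map (fun j => keyK p (i, j))).Nodup
        then some (PySem.Set.update seen (js.map (fun j => keyK p (i, j))))
        else none
  | [], seen, h => by simp [aInner, PySem.Set.update_nil, h]
  | j :: js, seen, h => by
    by_cases hm : keyK p (i, j) ∈ seen
    · have hm' : (j - i, PySem.List.pyGetD p j 0 - PySem.List.pyGetD p i 0) ∈ seen := hm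
      have hnd : ¬ (seen ++ keyK p (i, j) :: List.map (fun j => keyK p (i, j)) js).Nodup := by
        rw [List.nodup_append]
        rintro ⟨-, -, hdis⟩
        exact hdis _ hm _ (List.mem_cons_self) rfl
      simp [aInner, hm', hnd]
    · have hm' : (j - i, PySem.List.pyGetD p j 0 - PySem.List.pyGetD p i 0) ∉ seen := hm
      have hadd : PySem.Set.add seen (keyK p (i, j)) = seen ++ [keyK p (i, j)] :=
        PySem.Set.add_of_not_mem hm
      have hnd2 : (seen ++ [keyK p (i, j)]).Nodup := by
        rw [List.nodup_append]
        exact ⟨h, List.nodup_singleton _, by rintro a ha b hb rfl; simp at hb; exact hm (hb ▸ ha)⟩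
      have hstep : aInner p i (j :: js) seen = aInner p i js (PySem.Set.add seen (keyK p (i, j))) := by
        simp only [aInner]; rw [if_neg (by simp [hm'])]; rfl
      rw [hstep, hadd, aInner_eq p i js (seen ++ [keyK p (i, j)]) hnd2, List.map_cons,
        PySem.Set.update_cons, hadd]
      have hap : seen ++ [keyK p (i, j)] ++ List.map (fun j => keyK p (i, j)) js
          = seen ++ keyK p (i, j) :: List.map (fun j => keyK p (i, j)) js := by simp
      rw [hap]

-- A's outer loop decides Nodup of the full accumulated key list
lemma aOuter_eq (p : List Int) :
    ∀ (is_ : List Int) (seen : PySem.Set (Int × Int)), seen.Nodup →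
      aOuter p is_ seen =
        decide ((seen ++ is_.flatMap
          (fun i => (PySem.List.pyRange (i + 1) (p.length : Int) 1).map
            (fun j => keyK p (i, j)))).Nodup)
  | [], seen, h => by simp [aOuter, h]
  | i :: is, seen, h => by
    have hin := aInner_eq p i (PySem.List.pyRange (i + 1) (p.length : Int) 1) seen h
    set l := (PySem.List.pyRange (i + 1) (p.length : Int) 1).map (fun j => keyK p (i, j)) with hl
    by_cases hnd : (seen ++ l).Nodup
    · have hupd : PySem.Set.update seen l = seen ++ l := by
        rw [List.nodup_append] at hnd
        exact PySem.Set.update_eq_append_of_disjoint _ _ hnd.2.1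
          (fun x hx hxs => hnd.2.2 x hxs x hx rfl)
      have ih := aOuter_eq p is (seen ++ l) hnd
      simp only [aOuter, hin, if_pos hnd, hupd, ih, List.flatMap_cons, List.append_assoc]
      rfl
    · have hbig : ¬ (seen ++ (l ++ is.flatMap
          (fun i => (PySem.List.pyRange (i + 1) (p.length : Int) 1).map
            (fun j => keyK p (i, j))))).Nodup := by
        intro hbig
        exact hnd (hbig.sublist (by simp))
      simp only [aOuter, hin, if_neg hnd, List.flatMap_cons]
      exact (decide_eq_false hbig).symm

lemma a_char (p : List Int) : is_costas p = decide (((listA p).map (keyK p)).Nodup) := by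
  rw [is_costas, aOuter_eq p _ PySem.Set.empty List.nodup_nil]
  congr 1
  rw [listA, List.map_flatMap]
  simp [List.map_map, Function.comp_def]

-- the adjacent-pair scan finds a duplicate iff the list is NOT a chain of distinct entries
lemma any_zip_tail_eq_isChain :
    ∀ (l : List Int),
      ((l.zip l.tail).any (fun q => q.1 == q.2)) = !decide (l.IsChain (· ≠ ·))
  | [] => by simp
  | [a] => by simp
  | a :: b :: t => by
    have ih := any_zip_tail_eq_isChain (b :: t)
    show ((a, b) :: (b :: t).zip t).any (fun q => q.1 == q.2) = _
    rw [List.any_cons]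
    have hz : ((b :: t).zip t) = ((b :: t).zip (b :: t).tail) := rfl
    rw [hz, ih]
    by_cases hab : a = b <;> simp [hab, List.isChain_cons_cons]

-- for a ≤-sorted list of integers, adjacent distinctness is exactly Nodup
lemma isChain_ne_iff_nodup (l : List Int) (hpw : l.Pairwise (· ≤ ·)) :
    l.IsChain (· ≠ ·) ↔ l.Nodup := by
  constructor
  · intro hch
    have hle := hpw.isChain
    have hlt : l.IsChain (· < ·) := by
      rw [List.isChain_iff_getElem] at hch hle ⊢
      intro i hi
      exact lt_of_le_of_ne (hle i hi) (hch i hi)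
    exact (List.isChain_iff_pairwise.mp hlt).imp ne_of_lt
  · intro hnd
    exact hnd.isChain

-- one distance passes B's scan iff its difference list is Nodup
lemma bCheck_eq (p : List Int) (d : Int) :
    bCheck p d = !decide ((bDiffs p d).Nodup) := by
  rw [bCheck]
  have hperm := PySem.List.sorted_perm (bDiffs p d) (fun x => x) false
  rw [any_zip_tail_eq_isChain]
  congr 1
  rw [decide_eq_decide, isChain_ne_iff_nodup _ (PySem.List.sorted_pairwise _ _)]
  exact hperm.nodup_iff

-- B's outer loop decides Nodup of each per-distance difference list
lemma bOuter_eq (p : List Int) :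
    ∀ ds : List Int, bOuter p ds = decide (∀ d ∈ ds, (bDiffs p d).Nodup)
  | [] => by simp [bOuter]
  | d :: ds => by
    simp only [bOuter, bCheck_eq, bOuter_eq p ds]
    by_cases h1 : (bDiffs p d).Nodup
    · simp [h1]
    · simp [h1]

lemma b_char (p : List Int) :
    is_costas_alt p =
      decide (∀ d ∈ PySem.List.pyRange 1 (p.length : Int) 1, (bDiffs p d).Nodup) := by
  rw [is_costas_alt, bOuter_eq]

lemma mem_listA (p : List Int) (a b : Int) :
    (a, b) ∈ listA p ↔ 0 ≤ a ∧ a < b ∧ b < (p.length : Int) := by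
  simp only [listA, List.mem_flatMap, List.mem_map, PySem.List.mem_pyRange_one, Prod.mk.injEq]
  constructor
  · rintro ⟨i, ⟨h1, h2⟩, j, ⟨h3, h4⟩, rfl, rfl⟩; omega
  · rintro ⟨h1, h2, h3⟩; exact ⟨a, ⟨by omega, by omega⟩, b, ⟨by omega, by omega⟩, rfl, rfl⟩

lemma mem_listB (p : List Int) (a b : Int) :
    (a, b) ∈ listB p ↔ 0 ≤ a ∧ a < b ∧ b < (p.length : Int) := by
  simp only [listB, List.mem_flatMap, List.mem_map, PySem.List.mem_pyRange_one, Prod.mk.injEq]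
  constructor
  · rintro ⟨d, ⟨h1, h2⟩, i, ⟨h3, h4⟩, rfl, rfl⟩; omega
  · rintro ⟨h1, h2, h3⟩
    exact ⟨b - a, ⟨by omega, by omega⟩, a, ⟨by omega, by omega⟩, rfl, by omega⟩

lemma nodup_listA (p : List Int) : (listA p).Nodup := by
  rw [listA, List.nodup_flatMap]
  constructor
  · intro i _
    exact (PySem.List.nodup_pyRange_one _ _).map (fun x y h => by simpa using congrArg Prod.snd h)
  · refine (PySem.List.nodup_pyRange_one _ _).imp ?_
    intro i i' hne q hq hq'
    simp only [List.mem_map] at hq hq'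
    obtain ⟨j, -, rfl⟩ := hq
    obtain ⟨j', -, h⟩ := hq'
    exact hne (congrArg Prod.fst h).symm

lemma nodup_listB (p : List Int) : (listB p).Nodup := by
  rw [listB, List.nodup_flatMap]
  constructor
  · intro d _
    exact (PySem.List.nodup_pyRange_one _ _).map (fun x y h => by simpa using congrArg Prod.fst h)
  · refine (PySem.List.nodup_pyRange_one _ _).imp ?_
    intro d d' hne q hq hq'
    simp only [List.mem_map] at hq hq'
    obtain ⟨i, -, rfl⟩ := hq
    obtain ⟨i', -, h⟩ := hq'
    have h1 := congrArg Prod.fst h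
    have h2 := congrArg Prod.snd h
    simp only at h1 h2
    omega

-- A and B enumerate the same index pairs, in different orders
lemma perm_AB (p : List Int) : (listA p).Perm (listB p) := by
  rw [(List.perm_ext_iff_of_nodup (nodup_listA p) (nodup_listB p))]
  rintro ⟨a, b⟩
  rw [mem_listA, mem_listB]

-- B's key list, keys grouped by distance and tagged with it
lemma keysB_eq (p : List Int) :
    (listB p).map (keyK p) =
      (PySem.List.pyRange 1 (p.length : Int) 1).flatMap
        (fun d => (bDiffs p d).map (fun x => (d, x))) := by
  rw [listB, List.map_flatMap]
  congr 1
  funext d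
  rw [List.map_map, bDiffs, List.map_map]
  apply List.map_congr_left
  intro i _
  show keyK p (i, i + d) = (d, dkey p d i)
  unfold keyK dkey
  exact Prod.ext (by omega) rfl

lemma bridge (p : List Int) :
    ((listA p).map (keyK p)).Nodup ↔
      ∀ d ∈ PySem.List.pyRange 1 (p.length : Int) 1, (bDiffs p d).Nodup := by
  rw [((perm_AB p).map (keyK p)).nodup_iff, keysB_eq, List.nodup_flatMap]
  constructor
  · intro h d hd
    exact (h.1 d hd).of_map
  · intro h
    refine ⟨fun d hd => ((h d hd).map (fun x y hxy => by simpa using congrArg Prod.snd hxy)), ?_⟩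
    refine (PySem.List.nodup_pyRange_one _ _).imp ?_
    intro d d' hne q hq hq'
    simp only [List.mem_map] at hq hq'
    obtain ⟨x, -, rfl⟩ := hq
    obtain ⟨x', -, h'⟩ := hq'
    exact hne (congrArg Prod.fst h').symm

-- ===== VERDICT (by name: the statement is the Claim_ definition above) =====
theorem is_costas_spec : Claim_equal_is_costas := by
  intro p _
  unfold Spec_is_costas
  rw [a_char, b_char, decide_eq_decide]
  exact bridge p
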